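-- pv_equiv track=rewrite | github.com/blacha370/sudoku | SudokuSolver.py | get_box
-- ===== SOURCE A (Python) =====
-- def get_box(board: str, position: int):
--     if not isinstance(position, int) or isinstance(position, bool):
--         raise TypeError
--     elif not 0 <= position <= 80:
--         raise IndexError
--     else:
--         max_index = (position // 27 + 1) * 27
--         box_rows = board[max_index - 27:max_index]
--         box_index = position % 27 % 9 // 3
--         box = ''.join([box_rows[3 * box_index + 9 * i:3 * (box_index + 1) + 9 * i] for i in range(3)])
--         return box
-- ===== SOURCE B (Python) =====
-- def get_box(board: str, position: int):
--     if not isinstance(position, int) or isinstance(position, bool):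
--         raise TypeError
--     elif not 0 <= position <= 80:
--         raise IndexError
--     row0 = position // 27 * 3
--     col0 = position % 9 // 3 * 3
--     cells = []
--     for i in range(3):
--         for j in range(3):
--             k = (row0 + i) * 9 + col0 + j
--             cells.append(board[k:k + 1])
--     return ''.join(cells)
-- ===== Notes on version B (the rewrite author's own statement) =====
-- stated objective: alternative
-- what changed: B replaces A's band-extract-then-three-row-chunk slicing with direct 2-D box coordinates (start row/column) and a nested 3x3 cell loop collecting single-character slices.
import Mathlib
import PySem

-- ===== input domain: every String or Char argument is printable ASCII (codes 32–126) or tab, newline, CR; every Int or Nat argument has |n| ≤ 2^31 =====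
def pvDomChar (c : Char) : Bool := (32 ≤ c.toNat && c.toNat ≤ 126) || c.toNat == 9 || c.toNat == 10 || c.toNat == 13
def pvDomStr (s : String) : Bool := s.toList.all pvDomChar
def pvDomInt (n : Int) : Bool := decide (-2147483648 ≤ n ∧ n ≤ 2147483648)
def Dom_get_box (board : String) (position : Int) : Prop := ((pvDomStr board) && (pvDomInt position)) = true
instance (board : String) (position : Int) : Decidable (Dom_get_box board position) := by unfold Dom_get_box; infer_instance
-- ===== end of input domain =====

-- B extracts the 3x3 box by direct 2-D cell coordinates (nested 3x3 loop of single-char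
-- slices) instead of A's band-slice-then-row-chunk 1-D slicing; objective: alternative.

-- ===== PORT A =====
-- A's `isinstance` TypeError guard cannot fire here (position : Int is always a
-- non-bool int under the type convention); the IndexError guard is Pre_get_box.
def get_box (board : String) (position : Int) : String :=
  let maxIndex : Int := (PySem.Int.floordiv position 27 + 1) * 27
  let boxRows : String := PySem.Str.slice board (some (maxIndex - 27)) (some maxIndex)
  let boxIndex : Int := PySem.Int.floordiv (PySem.Int.mod (PySem.Int.mod position 27) 9) 3
  PySem.Str.join "" ((PySem.List.pyRange 0 3 1).map (fun i =>
    PySem.Str.slice boxRows (some (3 * boxIndex + 9 * i)) (some (3 * (boxIndex + 1) + 9 * i))))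

-- ===== PORT B =====
def get_box_alt (board : String) (position : Int) : String :=
  let row0 : Int := PySem.Int.floordiv position 27 * 3
  let col0 : Int := PySem.Int.floordiv (PySem.Int.mod position 9) 3 * 3
  let cells := (PySem.List.pyRange 0 3 1).foldl (fun acc i =>
    (PySem.List.pyRange 0 3 1).foldl (fun acc j =>
      acc ++ [PySem.Str.slice board (some ((row0 + i) * 9 + col0 + j))
                                    (some ((row0 + i) * 9 + col0 + j + 1))]) acc) []
  PySem.Str.join "" cells

-- ===== PRECONDITION & SPEC =====
-- A raises IndexError unless 0 <= position <= 80 (and B does the same).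
def Pre_get_box (board : String) (position : Int) : Prop := 0 ≤ position ∧ position ≤ 80
instance (board : String) (position : Int) : Decidable (Pre_get_box board position) := by
  unfold Pre_get_box; infer_instance
def pvWitness_get_box : String × Int :=
  ("123456789456789123789123456231564897564897231897231564312645978645978312978312645", 30)
def Spec_get_box (board : String) (position : Int) (out : String) : Prop := out = get_box_alt board position
instance (board : String) (position : Int) (out : String) : Decidable (Spec_get_box board position out) := by
  unfold Spec_get_box; infer_instance

-- ===== CLAIM (what is proved, stated in full; the proofs are below) =====
def Claim_equal_get_box : Prop := ∀ (board : String) (position : Int), Dom_get_box board position → Pre_get_box board position → Spec_get_box board position (get_box board position)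

-- ===== LEMMAS AND PROOFS =====
lemma range01 : PySem.List.pyRange 0 3 1 = [0, 1, 2] := by decide

lemma chunk3 (l : List Char) (d c : Nat) (h : c + 3 ≤ 27) :
    List.take 3 (List.drop c (List.take 27 (List.drop d l)))
      = List.take 1 (List.drop (d + c) l)
        ++ (List.take 1 (List.drop (d + c + 1) l) ++ List.take 1 (List.drop (d + c + 2) l)) := by
  rw [List.drop_take, List.take_take, min_eq_left (by omega)]
  rw [show (3 : Nat) = 1 + (1 + 1) from rfl, List.take_add, List.take_add]
  simp [List.drop_drop]

lemma get_box_eq_alt_nat (board : String) (n : Nat) :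
    (get_box board (n : Int)).toList = (get_box_alt board (n : Int)).toList := by
  simp only [get_box, Nat.ofNat_pos, PySem.Int.floordiv_eq_ediv_of_pos, PySem.Int.mod_eq_emod_of_pos,
    Int.reduceDvd, Int.emod_emod_of_dvd, range01, List.map_cons, mul_zero, add_zero, mul_one, Int.reduceMul,
    List.map_nil, PySem.Str.toList_join, String.toList_empty, PySem.Str.toList_slice, PySem.Chars.slice_eq_listSlice,
    get_box_alt, List.foldl_cons, List.foldl, List.append_assoc, List.cons_append, List.nil_append]
  rw [show ((n : Int) / 27) = ((n / 27 : Nat) : Int) from Eq.symm (Nat.ToInt.div_congr rfl rfl),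
      show ((n : Int) % 9) = ((n % 9 : Nat) : Int) from Eq.symm (Nat.ToInt.mod_congr rfl rfl),
      show ((((n % 9 : Nat)) : Int) / 3) = ((n % 9 / 3 : Nat) : Int) from Eq.symm (Nat.ToInt.div_congr rfl rfl)]
  have hr : n % 9 / 3 ≤ 2 := by omega
  generalize n % 9 / 3 = r at hr
  generalize n / 27 = q
  rw [show ((q : Int) + 1) * 27 - 27 = ((27 * q : Nat) : Int) by push_cast; ring,
      show ((q : Int) + 1) * 27 = ((27 * q + 27 : Nat) : Int) by push_cast; ring,
      show (3 : Int) * (r : Int) = ((3 * r : Nat) : Int) by push_cast; ring,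
      show (3 : Int) * ((r : Int) + 1) = ((3 * r + 3 : Nat) : Int) by push_cast; ring]
  norm_cast
  simp only [PySem.List.slice_natCast]
  simp only [show ∀ a : Nat, a + 3 - a = 3 from fun a => by omega,
    show ∀ a : Nat, a + 1 - a = 1 from fun a => by omega,
    show ∀ a : Nat, 27 * a + 27 - 27 * a = 27 from fun a => by omega]
  rw [chunk3 _ _ _ (by omega), chunk3 _ _ _ (by omega), chunk3 _ _ _ (by omega)]
  simp only [PySem.Chars.join_cons_cons, PySem.Chars.join_singleton, List.append_assoc, List.append_nil]
  ring_nf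

-- ===== VERDICT (by name: the statement is the Claim_ definition above) =====
theorem get_box_spec : Claim_equal_get_box := by
  intro board position _ hpre
  unfold Spec_get_box
  obtain ⟨h0, _⟩ := hpre
  lift position to ℕ using h0 with n
  exact String.toList_inj.mp (get_box_eq_alt_nat board n)
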